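-- pv_equiv track=rewrite | github.com/tsangel/test | misc/dictionary/generate_lookup_tables.py | parse_tag_pattern
-- ===== SOURCE A (Python) =====
-- def strip_tag_separators(tag: str) -> str:
--     return tag.replace("(", "").replace(")", "").replace(",", "").replace(" ", "")
--
-- def parse_tag_pattern(tag: str) -> tuple[int, int, bool] | None:
--     cleaned = strip_tag_separators(tag)
--     if len(cleaned) != 8:
--         return None
--     value = 0
--     mask = 0
--     has_wildcard = False
--     for ch in cleaned:
--         value <<= 4
--         mask <<= 4
--         if "0" <= ch <= "9" or "A" <= ch <= "F" or "a" <= ch <= "f":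
--             digit = int(ch, 16)
--             value |= digit
--             mask |= 0xF
--         elif ch in {"x", "X"}:
--             has_wildcard = True
--             # Wildcard nibble: mask stays zero, value already shifted.
--         else:
--             return None
--     return value, mask, has_wildcard
-- ===== SOURCE B (Python) =====
-- def strip_tag_separators(tag: str) -> str:
--     return tag.replace("(", "").replace(")", "").replace(",", "").replace(" ", "")
--
-- _HEX = "0123456789abcdefABCDEF"
--
-- def parse_tag_pattern(tag: str):
--     cleaned = strip_tag_separators(tag)
--     if len(cleaned) != 8:
--         return None
--     if any(c not in _HEX and c not in "xX" for c in cleaned):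
--         return None
--     value = int("".join("0" if c in "xX" else c for c in cleaned), 16)
--     mask = int("".join("0" if c in "xX" else "F" for c in cleaned), 16)
--     has_wildcard = any(c in "xX" for c in cleaned)
--     return value, mask, has_wildcard
-- ===== Notes on version B (the rewrite author's own statement) =====
-- stated objective: idiomatic
-- what changed: Replaced the single shift/OR accumulator loop with a validate-once pass followed by two closed-form base-16 conversions of substituted strings (wildcards mapped to '0'/'F') and an any() for the wildcard flag.
import Mathlib
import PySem

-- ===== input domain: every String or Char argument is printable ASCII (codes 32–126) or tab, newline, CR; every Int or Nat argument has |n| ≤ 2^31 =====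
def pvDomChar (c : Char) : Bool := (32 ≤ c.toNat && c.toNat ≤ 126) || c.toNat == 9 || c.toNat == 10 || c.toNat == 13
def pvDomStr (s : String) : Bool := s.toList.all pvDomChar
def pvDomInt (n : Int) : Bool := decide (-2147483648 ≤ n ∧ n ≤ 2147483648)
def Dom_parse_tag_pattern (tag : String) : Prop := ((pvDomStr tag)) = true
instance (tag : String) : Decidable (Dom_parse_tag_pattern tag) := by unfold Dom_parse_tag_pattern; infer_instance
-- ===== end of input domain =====

-- B replaces A's shift/OR accumulator loop by a validate-once pass plus two closed-form
-- base-16 conversions of wildcard-substituted strings and an any() for the flag (idiomatic, same cost).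

-- shared: the numeric value of a hex digit character (= Python's int(ch, 16) on a single hex digit)
def pvHexVal (c : Char) : Int :=
  if '0' ≤ c ∧ c ≤ '9' then (c.toNat : Int) - 48
  else if 'A' ≤ c ∧ c ≤ 'F' then (c.toNat : Int) - 55
  else if 'a' ≤ c ∧ c ≤ 'f' then (c.toNat : Int) - 87
  else 0

-- ===== PORT A =====
def pvStripA (tag : String) : String :=
  PySem.Str.replace (PySem.Str.replace (PySem.Str.replace (PySem.Str.replace tag "(" "") ")" "") "," "") " " ""

-- A's for-loop over the cleaned characters, carrying (value, mask, has_wildcard).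
-- 'value <<= 4' is ported as * 16 (exact: value stays ≥ 0) and 'value |= digit' / 'mask |= 0xF'
-- as + (exact: the low nibble is zero right after the shift).
def pvLoopA : List Char → Int → Int → Bool → Option (Int × Int × Bool)
  | [], v, m, w => some (v, m, w)
  | c :: cs, v, m, w =>
      let v' := v * 16
      let m' := m * 16
      if ('0' ≤ c ∧ c ≤ '9') ∨ ('A' ≤ c ∧ c ≤ 'F') ∨ ('a' ≤ c ∧ c ≤ 'f') then
        pvLoopA cs (v' + pvHexVal c) (m' + 15) w
      else if c = 'x' ∨ c = 'X' then
        pvLoopA cs v' m' true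
      else none

def parse_tag_pattern (tag : String) : Option (Int × Int × Bool) :=
  let cleaned := pvStripA tag
  if PySem.Str.len cleaned ≠ 8 then none
  else pvLoopA cleaned.toList 0 0 false

-- ===== PORT B =====
def pvStripB (tag : String) : String :=
  PySem.Str.replace (PySem.Str.replace (PySem.Str.replace (PySem.Str.replace tag "(" "") ")" "") "," "") " " ""

def pvHexChars : List Char := "0123456789abcdefABCDEF".toList
def pvWildChars : List Char := "xX".toList

-- port of int(s, 16) on an all-hex-digit string: positional base-16 fold
def pvHexToInt (cs : List Char) : Int := cs.foldl (fun a c => 16 * a + pvHexVal c) 0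

def parse_tag_pattern_alt (tag : String) : Option (Int × Int × Bool) :=
  let cleaned := pvStripB tag
  if PySem.Str.len cleaned ≠ 8 then none
  else
    let cs := cleaned.toList
    if cs.any (fun c => !(pvHexChars.contains c) && !(pvWildChars.contains c)) then none
    else
      some (pvHexToInt (cs.map fun c => if pvWildChars.contains c then '0' else c),
            pvHexToInt (cs.map fun c => if pvWildChars.contains c then '0' else 'F'),
            cs.any fun c => pvWildChars.contains c)

-- ===== PRECONDITION & SPEC =====
def Spec_parse_tag_pattern (tag : String) (out : Option (Int × Int × Bool)) : Prop := out = parse_tag_pattern_alt tag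
instance (tag : String) (out : Option (Int × Int × Bool)) : Decidable (Spec_parse_tag_pattern tag out) := by unfold Spec_parse_tag_pattern; infer_instance

-- ===== CLAIM (what is proved, stated in full; the proofs are below) =====
def Claim_equal_parse_tag_pattern : Prop := ∀ (tag : String), Dom_parse_tag_pattern tag → Spec_parse_tag_pattern tag (parse_tag_pattern tag)

-- ===== LEMMAS AND PROOFS =====

theorem pvChar_le_iff (a b : Char) : a ≤ b ↔ a.toNat ≤ b.toNat := by
  rw [Char.le_def]
  exact UInt32.le_iff_toNat_le

-- the three classes of characters, related across A's range tests and B's membership tests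
theorem pvChar_of_toNat (c : Char) (k : Nat) (h : c.toNat = k) : c = Char.ofNat k := by
  rw [← h]; exact (Char.ofNat_toNat c).symm

theorem pvHexChars_eq : pvHexChars = ['0','1','2','3','4','5','6','7','8','9','a','b','c','d','e','f','A','B','C','D','E','F'] := by
  decide

-- the two classes of characters, related across A's range tests and B's membership tests
theorem pvHex_mem_iff (c : Char) :
    pvHexChars.contains c = true ↔
      (('0' ≤ c ∧ c ≤ '9') ∨ ('A' ≤ c ∧ c ≤ 'F') ∨ ('a' ≤ c ∧ c ≤ 'f')) := by
  rw [pvHexChars_eq, List.contains_iff_mem]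
  constructor
  · intro h
    fin_cases h <;> decide
  · intro h
    simp only [pvChar_le_iff] at h
    rw [show ('0' : Char).toNat = 48 from by decide, show ('9' : Char).toNat = 57 from by decide,
        show ('A' : Char).toNat = 65 from by decide, show ('F' : Char).toNat = 70 from by decide,
        show ('a' : Char).toNat = 97 from by decide, show ('f' : Char).toNat = 102 from by decide] at h
    have hd : c.toNat = 48 ∨ c.toNat = 49 ∨ c.toNat = 50 ∨ c.toNat = 51 ∨ c.toNat = 52 ∨
        c.toNat = 53 ∨ c.toNat = 54 ∨ c.toNat = 55 ∨ c.toNat = 56 ∨ c.toNat = 57 ∨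
        c.toNat = 65 ∨ c.toNat = 66 ∨ c.toNat = 67 ∨ c.toNat = 68 ∨ c.toNat = 69 ∨
        c.toNat = 70 ∨ c.toNat = 97 ∨ c.toNat = 98 ∨ c.toNat = 99 ∨ c.toNat = 100 ∨
        c.toNat = 101 ∨ c.toNat = 102 := by omega
    rcases hd with h'|h'|h'|h'|h'|h'|h'|h'|h'|h'|h'|h'|h'|h'|h'|h'|h'|h'|h'|h'|h'|h' <;>
      rw [pvChar_of_toNat c _ h'] <;> decide

theorem pvWild_mem_iff (c : Char) :
    pvWildChars.contains c = true ↔ (c = 'x' ∨ c = 'X') := by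
  simp [pvWildChars, List.contains_eq_mem]

theorem pvHex_wild_disjoint (c : Char)
    (h : ('0' ≤ c ∧ c ≤ '9') ∨ ('A' ≤ c ∧ c ≤ 'F') ∨ ('a' ≤ c ∧ c ≤ 'f')) :
    pvWildChars.contains c = false := by
  rw [Bool.eq_false_iff]
  intro hw
  rcases (pvWild_mem_iff c).mp hw with rfl | rfl <;>
    simp only [pvChar_le_iff] at h <;> revert h <;> decide

-- A's loop, characterised in B's validate-then-convert shape
theorem pvLoopA_eq (cs : List Char) (v m : Int) (w : Bool) :
    pvLoopA cs v m w =
      if cs.any (fun c => !(pvHexChars.contains c) && !(pvWildChars.contains c)) then none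
      else some
        (cs.foldl (fun a c => 16 * a + pvHexVal (if pvWildChars.contains c then '0' else c)) v,
         cs.foldl (fun a c => 16 * a + pvHexVal (if pvWildChars.contains c then '0' else 'F')) m,
         w || cs.any fun c => pvWildChars.contains c) := by
  induction cs generalizing v m w with
  | nil => simp [pvLoopA]
  | cons c cs ih =>
    by_cases hhex : ('0' ≤ c ∧ c ≤ '9') ∨ ('A' ≤ c ∧ c ≤ 'F') ∨ ('a' ≤ c ∧ c ≤ 'f')
    · have hm : c ∈ pvHexChars := by simpa using (pvHex_mem_iff c).mpr hhex
      have hw : c ∉ pvWildChars := by simpa using pvHex_wild_disjoint c hhex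
      have hF : pvHexVal 'F' = 15 := by decide
      simp [pvLoopA, hhex, hm, hw, ih, hF, mul_comm]
    · have hm : c ∉ pvHexChars := by
        intro h; exact hhex ((pvHex_mem_iff c).mp (by simpa using h))
      by_cases hwild : c = 'x' ∨ c = 'X'
      · have hw : c ∈ pvWildChars := by simpa using (pvWild_mem_iff c).mpr hwild
        have h0 : pvHexVal '0' = 0 := by decide
        simp [pvLoopA, hhex, hwild, hm, hw, ih, h0, mul_comm]
      · have hw : c ∉ pvWildChars := by
          intro h; exact hwild ((pvWild_mem_iff c).mp (by simpa using h))
        simp [pvLoopA, hhex, hwild, hm, hw]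

-- ===== VERDICT (by name: the statement is the Claim_ definition above) =====
theorem parse_tag_pattern_spec : Claim_equal_parse_tag_pattern := by
  intro tag _
  unfold Spec_parse_tag_pattern parse_tag_pattern parse_tag_pattern_alt pvStripA pvStripB pvHexToInt
  simp only []
  split
  · rfl
  · rw [pvLoopA_eq]
    simp [List.foldl_map]
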